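-- pv_equiv track=rewrite | github.com/zerofish0/tp_nsi | tp6+7-conversions_bin_dec_hex.py | relativeBinToDec
-- ===== SOURCE A (Python) =====
-- def relativeBinToDec(base2) :
-- 	"""Convertit un nombre entier relatif en base 2 en base 10
-- 	params :
-- 		base2: int ; le nombre entier relatif en base 2
-- 	return :
-- 		response : list ; le nombre converti
-- 	"""
-- 	power = len(base2)-1
-- 	response = -(abs(base2[0]) * 2 ** power)
-- 	power -= 1
-- 	for i in base2[1:] :
-- 		response += i * 2 ** power
-- 		power -= 1
-- 	return response
-- ===== SOURCE B (Python) =====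
-- def relativeBinToDec(base2):
--     acc = -abs(base2[0])
--     for bit in base2[1:]:
--         acc = acc * 2 + bit
--     return acc
-- ===== Notes on version B (the rewrite author's own statement) =====
-- stated objective: faster
-- what changed: Replaces per-digit 2**power big-int exponentiations and power bookkeeping with a single Horner pass acc = acc*2 + bit.
import Mathlib
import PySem

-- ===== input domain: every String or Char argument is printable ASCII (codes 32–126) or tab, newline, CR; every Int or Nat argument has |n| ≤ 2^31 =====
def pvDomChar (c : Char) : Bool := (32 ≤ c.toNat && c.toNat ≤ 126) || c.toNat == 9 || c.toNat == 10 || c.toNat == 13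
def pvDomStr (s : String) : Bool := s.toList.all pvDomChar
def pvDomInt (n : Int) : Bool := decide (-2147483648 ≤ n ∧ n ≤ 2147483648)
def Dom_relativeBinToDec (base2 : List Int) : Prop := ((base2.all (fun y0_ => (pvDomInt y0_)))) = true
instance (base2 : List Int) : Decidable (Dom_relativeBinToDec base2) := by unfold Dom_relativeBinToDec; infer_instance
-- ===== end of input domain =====

-- B replaces A's per-digit 2**power exponentiations with a single Horner pass (acc = acc*2 + bit): faster.

-- ===== PORT A =====
-- A: power = len-1; response = -(abs(base2[0]) * 2**power); power -= 1;
-- then for each i in base2[1:]: response += i * 2**power; power -= 1.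
-- power is an Int as in Python; every exponent actually used is ≥ 0, so 2 ^ power.toNat is exact.
def relativeBinToDec (base2 : List Int) : Int :=
  match base2 with
  | [] => 0  -- Python raises IndexError here; excluded by Pre_
  | b0 :: rest =>
    let power : Int := (base2.length : Int) - 1
    let response : Int := -(|b0| * 2 ^ power.toNat)
    (rest.foldl (fun (s : Int × Int) i => (s.1 + i * 2 ^ s.2.toNat, s.2 - 1))
      (response, power - 1)).1

-- ===== PORT B =====
def relativeBinToDec_alt (base2 : List Int) : Int :=
  match base2 with
  | [] => 0  -- Python raises IndexError here; excluded by Pre_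
  | b0 :: rest => rest.foldl (fun acc bit => acc * 2 + bit) (-|b0|)

-- ===== PRECONDITION & SPEC =====
-- A (and B) index the first element, raising IndexError on the empty list: Pre_ excludes exactly that.
def Pre_relativeBinToDec (base2 : List Int) : Prop := base2 ≠ []
instance (base2 : List Int) : Decidable (Pre_relativeBinToDec base2) := by
  unfold Pre_relativeBinToDec; infer_instance
def pvWitness_relativeBinToDec : List Int := [1, 0, 1, 1]

def Spec_relativeBinToDec (base2 : List Int) (out : Int) : Prop := out = relativeBinToDec_alt base2
instance (base2 : List Int) (out : Int) : Decidable (Spec_relativeBinToDec base2 out) := by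
  unfold Spec_relativeBinToDec; infer_instance

-- ===== CLAIM (what is proved, stated in full; the proofs are below) =====
def Claim_equal_relativeBinToDec : Prop := ∀ (base2 : List Int), Dom_relativeBinToDec base2 → Pre_relativeBinToDec base2 → Spec_relativeBinToDec base2 (relativeBinToDec base2)

-- ===== LEMMAS AND PROOFS =====

-- A's power-tracking fold over the tail, started with the weight 2^l.length already baked
-- into the accumulator, computes exactly B's Horner fold.
theorem pow_fold_eq_horner (l : List Int) (r : Int) :
    (l.foldl (fun (s : Int × Int) i => (s.1 + i * 2 ^ s.2.toNat, s.2 - 1))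
      (r * 2 ^ l.length, (l.length : Int) - 1)).1
    = l.foldl (fun acc bit => acc * 2 + bit) r := by
  induction l generalizing r with
  | nil => simp
  | cons b t ih =>
    have h1 : (((b :: t).length : Int) - 1) = (t.length : Int) := by simp
    have h2 : ((t.length : Int)).toNat = t.length := Int.toNat_natCast _
    simp only [List.foldl, h1, h2]
    have h3 : r * 2 ^ (b :: t).length + b * 2 ^ t.length
        = (r * 2 + b) * 2 ^ t.length := by
      simp [List.length_cons, pow_succ]; ring
    rw [h3]
    have h4 : (t.length : Int) - 1 = ((t.length : Int) - 1) := rfl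
    exact ih (r * 2 + b)

-- ===== VERDICT (by name: the statement is the Claim_ definition above) =====
theorem relativeBinToDec_spec : Claim_equal_relativeBinToDec := by
  intro base2 _ hpre
  unfold Spec_relativeBinToDec
  match base2 with
  | [] => exact absurd rfl hpre
  | b0 :: rest =>
    show (rest.foldl _ (-(|b0| * 2 ^ (((b0 :: rest).length : Int) - 1).toNat),
        ((b0 :: rest).length : Int) - 1 - 1)).1 = _
    have hl : (((b0 :: rest).length : Int) - 1) = (rest.length : Int) := by simp
    rw [hl, Int.toNat_natCast]
    have h := pow_fold_eq_horner rest (-|b0|)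
    rw [neg_mul] at h
    exact h.trans (by simp [relativeBinToDec_alt])
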